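-- pv_equiv track=rewrite | github.com/chiefnoah/pattern-matching-interview | pattern_matching/pattern_matching_v2.py | _tokenize_star
-- ===== SOURCE A (Python) =====
-- def _tokenize_star(s):
--     """
--     :type s: str
--     :rtype: list
--     Tokenizes string on * characters for pattern matching
--     Preserves character and trims empty groups
--     """
--     output = []
--     groups = s.split("*")
--     for x in groups[:-1:]:
--         if x != "":
--             if len(x) == 1:
--                 output.append(x + "*")
--             else:
--                 output.append(x[:-1:])
--                 output.append(x[-1] + "*")
--     if groups[-1] != "":
--         output.append(groups[-1])
--     return output
-- ===== SOURCE B (Python) =====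
-- def _tokenize_star(s):
--     """Single streaming pass over the characters instead of split-then-scan."""
--     output = []
--     buf = ""
--     for c in s:
--         if c == "*":
--             if buf != "":
--                 if len(buf) > 1:
--                     output.append(buf[:-1])
--                 output.append(buf[-1] + "*")
--                 buf = ""
--         else:
--             buf += c
--     if buf != "":
--         output.append(buf)
--     return output
-- ===== Notes on version B (the rewrite author's own statement) =====
-- stated objective: alternative
-- what changed: B replaces A's split-on-'*'-then-scan-the-group-list structure with a single streaming pass over the characters that maintains a literal buffer and emits tokens at each '*'.
import Mathlib
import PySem

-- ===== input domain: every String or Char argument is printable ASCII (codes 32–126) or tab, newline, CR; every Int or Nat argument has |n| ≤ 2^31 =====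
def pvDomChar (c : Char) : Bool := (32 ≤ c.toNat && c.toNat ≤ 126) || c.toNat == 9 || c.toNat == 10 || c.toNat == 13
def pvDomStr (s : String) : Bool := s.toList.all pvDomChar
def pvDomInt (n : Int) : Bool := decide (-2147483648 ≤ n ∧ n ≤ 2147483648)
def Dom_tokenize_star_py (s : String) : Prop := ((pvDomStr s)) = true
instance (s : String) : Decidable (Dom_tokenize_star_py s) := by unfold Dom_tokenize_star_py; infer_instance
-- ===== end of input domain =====

-- B replaces A's split-on-'*'-then-scan structure with a single streaming character pass (alternative decomposition, same cost).


-- ===== PORT A =====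
-- literal transliteration of A: split on '*', loop over groups[:-1:], then the last group
def tokenize_star_py (s : String) : List String :=
  let groups := PySem.Chars.splitOn s.toList ['*']
  let output := (PySem.List.slice groups none (some (-1))).foldl
    (fun output x =>
      if x ≠ [] then
        if x.length = 1 then output ++ [x ++ ['*']]
        else output ++ [PySem.List.slice x none (some (-1))]
                    ++ [[(PySem.List.pyGet? x (-1)).getD ' ', '*']]  -- x ≠ [], so the default is never used
      else output) []
  let last := (PySem.List.pyGet? groups (-1)).getD []  -- split never returns [], so the default is never used
  let output := if last ≠ [] then output ++ [last] else output
  output.map String.ofList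

-- ===== PORT B =====
-- literal transliteration of B: one fold over the characters with an (output, buffer) state
def tokenize_star_py_alt (s : String) : List String :=
  let st := s.toList.foldl
    (fun (st : List (List Char) × List Char) c =>
      if c = '*' then
        if st.2 ≠ [] then
          ((if st.2.length > 1 then st.1 ++ [PySem.List.slice st.2 none (some (-1))] else st.1)
             ++ [[(PySem.List.pyGet? st.2 (-1)).getD ' ', '*']], ([] : List Char))  -- st.2 ≠ [], default unused
        else st
      else (st.1, st.2 ++ [c])) ([], [])
  (if st.2 ≠ [] then st.1 ++ [st.2] else st.1).map String.ofList

-- ===== PRECONDITION & SPEC =====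
def Spec_tokenize_star_py (s : String) (out : List String) : Prop := out = tokenize_star_py_alt s
instance (s : String) (out : List String) : Decidable (Spec_tokenize_star_py s out) := by unfold Spec_tokenize_star_py; infer_instance

-- ===== CLAIM (what is proved, stated in full; the proofs are below) =====
def Claim_equal_tokenize_star_py : Prop := ∀ (s : String), Dom_tokenize_star_py s → Spec_tokenize_star_py s (tokenize_star_py s)

-- ===== LEMMAS AND PROOFS =====

-- proof-only names for B's loop body and its finishing step (definitionally the lambdas in the port)
def pvStepB (st : List (List Char) × List Char) (c : Char) : List (List Char) × List Char :=
  if c = '*' then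
    if st.2 ≠ [] then
      ((if st.2.length > 1 then st.1 ++ [PySem.List.slice st.2 none (some (-1))] else st.1)
         ++ [[(PySem.List.pyGet? st.2 (-1)).getD ' ', '*']], ([] : List Char))
    else st
  else (st.1, st.2 ++ [c])

def pvFinishB (st : List (List Char) × List Char) : List (List Char) :=
  if st.2 ≠ [] then st.1 ++ [st.2] else st.1

-- proof-only recursive rendering of splitting on '*'; cur holds the current group reversed (go's convention)
def pvSplit (l : List Char) (cur : List Char) : List (List Char) :=
  match l with
  | [] => [cur.reverse]
  | c :: rest => if c = '*' then cur.reverse :: pvSplit rest [] else pvSplit rest (c :: cur)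

-- what A emits for one non-last group
def pvEmit (x : List Char) : List (List Char) :=
  if x = [] then []
  else if x.length = 1 then [x ++ ['*']]
  else [x.dropLast, [(x.getLast?).getD ' ', '*']]

-- A's whole result (char level) as a function of the group list
def pvCore (groups : List (List Char)) : List (List Char) :=
  groups.dropLast.flatMap pvEmit ++
    (if (groups.getLast?).getD [] ≠ [] then [(groups.getLast?).getD []] else [])

lemma pvSplit_ne_nil (l cur : List Char) : pvSplit l cur ≠ [] := by
  induction l generalizing cur with
  | nil => simp [pvSplit]
  | cons c rest ih => by_cases h : c = '*' <;> simp [pvSplit, h, ih]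

lemma go_eq (l : List Char) : ∀ (fuel : Nat) (cur : List Char) (accL : List (List Char)),
    l.length ≤ fuel →
    PySem.Chars.splitOn.go ['*'] fuel l cur accL = accL.reverse ++ pvSplit l cur := by
  induction l with
  | nil =>
      intro fuel cur accL _
      cases fuel <;> simp [PySem.Chars.splitOn.go, pvSplit]
  | cons c rest ih =>
      intro fuel cur accL h
      cases fuel with
      | zero => simp at h
      | succ f =>
        by_cases hc : c = '*'
        · subst hc
          have hr : rest.length ≤ f := by simpa using h
          simp [PySem.Chars.splitOn.go, List.isPrefixOf, pvSplit, ih f [] (cur.reverse :: accL) hr]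
        · have hr : rest.length ≤ f := by simpa using h
          simp [PySem.Chars.splitOn.go, List.isPrefixOf, hc, Ne.symm hc, pvSplit,
                ih f (c :: cur) accL hr]

lemma splitOn_eq (l : List Char) : PySem.Chars.splitOn l ['*'] = pvSplit l [] := by
  simpa using go_eq l (l.length + 1) [] [] (by omega)

lemma getLast?_cons_ne_nil {α : Type} (x : α) (G : List α) (hG : G ≠ []) :
    (x :: G).getLast? = G.getLast? := by
  cases G with
  | nil => exact absurd rfl hG
  | cons y t => simp [List.getLast?_cons_cons]

lemma core_cons (x : List Char) (G : List (List Char)) (hG : G ≠ []) :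
    pvCore (x :: G) = pvEmit x ++ pvCore G := by
  simp [pvCore, List.dropLast_cons_of_ne_nil hG, getLast?_cons_ne_nil _ _ hG]

lemma foldA_eq (gs : List (List Char)) (acc : List (List Char)) :
    gs.foldl
      (fun output x =>
        if x ≠ [] then
          if x.length = 1 then output ++ [x ++ ['*']]
          else output ++ [PySem.List.slice x none (some (-1))]
                      ++ [[(PySem.List.pyGet? x (-1)).getD ' ', '*']]
        else output) acc = acc ++ gs.flatMap pvEmit := by
  induction gs generalizing acc with
  | nil => simp
  | cons x G ih =>
      simp only [List.foldl_cons, ih, List.flatMap_cons]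
      by_cases hx : x = []
      · simp [hx, pvEmit]
      · by_cases h1 : x.length = 1
        · simp [hx, h1, pvEmit]
        · simp [hx, h1, pvEmit, PySem.List.slice_to_neg_one, PySem.List.pyGet?_neg_one,
                List.append_assoc]

-- the streaming invariant: B's fold from (accB, buf) finishes to accB ++ A's answer on pvSplit l buf.reverse
lemma main_inv (l : List Char) : ∀ (buf : List Char) (accB : List (List Char)),
    pvFinishB (l.foldl pvStepB (accB, buf)) = accB ++ pvCore (pvSplit l buf.reverse) := by
  induction l with
  | nil =>
      intro buf accB
      by_cases hb : buf = [] <;>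
        simp [pvFinishB, pvSplit, pvCore, hb]
  | cons c rest ih =>
      intro buf accB
      by_cases hc : c = '*'
      · subst hc
        by_cases hb : buf = []
        · have : pvSplit ('*' :: rest) buf.reverse = buf :: pvSplit rest [] := by
            simp [pvSplit, hb]
          rw [List.foldl_cons, this, core_cons _ _ (pvSplit_ne_nil _ _)]
          simp [pvStepB, hb, ih, pvEmit]
        · have hs : pvSplit ('*' :: rest) buf.reverse = buf :: pvSplit rest [] := by
            simp [pvSplit]
          rw [List.foldl_cons, hs, core_cons _ _ (pvSplit_ne_nil _ _)]
          have hstep : pvStepB (accB, buf) '*' =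
              ((if buf.length > 1 then accB ++ [buf.dropLast] else accB)
                 ++ [[(buf.getLast?).getD ' ', '*']], ([] : List Char)) := by
            simp [pvStepB, hb, PySem.List.slice_to_neg_one, PySem.List.pyGet?_neg_one]
          rw [hstep, ih]
          by_cases h1 : buf.length = 1
          · obtain ⟨a, ha⟩ : ∃ a, buf = [a] := by
              cases buf with
              | nil => simp at h1
              | cons a t => cases t with
                | nil => exact ⟨a, rfl⟩
                | cons b u => simp at h1
            subst ha
            simp [pvEmit]
          · have hgt : buf.length > 1 := by
              have : buf.length ≠ 0 := by simpa using hb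
              omega
            simp [pvEmit, hb, h1, hgt, List.append_assoc]
      · have : pvSplit (c :: rest) buf.reverse = pvSplit rest (buf ++ [c]).reverse := by
          simp [pvSplit, hc]
        rw [List.foldl_cons, this]
        simpa [pvStepB, hc] using ih (buf ++ [c]) accB

lemma portA_char (s : String) :
    tokenize_star_py s = (pvCore (pvSplit s.toList [])).map String.ofList := by
  unfold tokenize_star_py
  simp only [splitOn_eq]
  rw [foldA_eq]
  simp only [PySem.List.slice_to_neg_one, PySem.List.pyGet?_neg_one, List.nil_append]
  by_cases h : (pvSplit s.toList []).getLast?.getD [] = [] <;> simp [pvCore, h]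

lemma portB_char (s : String) :
    tokenize_star_py_alt s = (pvCore (pvSplit s.toList [])).map String.ofList := by
  unfold tokenize_star_py_alt
  have h := main_inv s.toList [] []
  simp only [List.reverse_nil, List.nil_append] at h
  show (pvFinishB (s.toList.foldl pvStepB ([], []))).map String.ofList = _
  rw [h]

-- ===== VERDICT (by name: the statement is the Claim_ definition above) =====
theorem tokenize_star_py_spec : Claim_equal_tokenize_star_py := by
  intro s _
  unfold Spec_tokenize_star_py
  rw [portA_char, portB_char]
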